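-- pv_equiv track=rewrite | github.com/nepthius/pokerbot | backend/engine/ranges.py | grid_from_range_map
-- ===== SOURCE A (Python) =====
-- RANKS   = ["A","K","Q","J","T","9","8","7","6","5","4","3","2"]
--
-- def grid_from_range_map( rmap ):
--     n = len(RANKS)
--     grid = [
--         [ "" for x in range(n) ]
--         for   x   in range(n)
--     ]
--
--     for ii, r1 in enumerate(RANKS):
--         for jj, r2 in enumerate(RANKS):
--
--             if ii==jj:
--                 key = f"{r1}{r2}"
--             elif ii < jj:
--                 key = f"{r1}{r2}s"
--             else:
--                 key = f"{r2}{r1}o"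
--
--             if key in rmap:
--                 grid[ii][jj] = rmap[key]
--
--     return grid
-- ===== SOURCE B (Python) =====
-- RANKS = ["A","K","Q","J","T","9","8","7","6","5","4","3","2"]
-- POS = {r: i for i, r in enumerate(RANKS)}
--
--
-- def pos_of(key, n):
--     return POS.get(key[n])
--
--
-- def grid_from_range_map(rmap):
--     n = len(RANKS)
--     grid = [["" for _ in range(n)] for _ in range(n)]
--     for key, value in rmap.items():
--         if len(key) == 2:
--             i, j = pos_of(key, 0), pos_of(key, 1)
--             if i is not None and j is not None:
--                 if i == j:
--                     grid[i][j] = value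
--         elif len(key) == 3:
--             i, j = pos_of(key, 0), pos_of(key, 1)
--             if i is not None and j is not None:
--                 if key[2] == "s":
--                     if i < j:
--                         grid[i][j] = value
--                 elif key[2] == "o":
--                     if i < j:
--                         grid[j][i] = value
--     return grid
-- ===== Notes on version B (the rewrite author's own statement) =====
-- stated objective: alternative
-- what changed: B makes one pass over the map's items, parsing each key and placing its value in the cell whose canonical key it is (ignoring keys that parse to a non-canonical form), instead of enumerating all 169 grid cells and looking each canonical key up in the map.
import Mathlib
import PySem

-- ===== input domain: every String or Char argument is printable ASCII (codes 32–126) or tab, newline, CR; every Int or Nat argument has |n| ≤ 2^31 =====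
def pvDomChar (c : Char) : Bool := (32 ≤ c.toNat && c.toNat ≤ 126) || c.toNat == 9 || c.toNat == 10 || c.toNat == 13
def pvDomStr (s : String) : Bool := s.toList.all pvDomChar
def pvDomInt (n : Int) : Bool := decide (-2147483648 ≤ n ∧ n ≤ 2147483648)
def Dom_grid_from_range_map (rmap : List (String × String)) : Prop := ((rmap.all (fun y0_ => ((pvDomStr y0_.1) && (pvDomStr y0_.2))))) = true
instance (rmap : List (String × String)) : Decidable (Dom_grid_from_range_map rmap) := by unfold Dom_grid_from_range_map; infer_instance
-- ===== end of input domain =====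

-- B builds the same 13x13 grid in one pass over the map's items (parsing and validating each
-- key) instead of looking up all 169 canonical cell keys; equivalence is proved for
-- association lists with pairwise-distinct keys (the ones that represent a Python dict).

-- ===== PORT A =====
def pvRANKS : List String := ["A","K","Q","J","T","9","8","7","6","5","4","3","2"]

-- body of A's inner loop: one (jj, r2) step of 'for jj, r2 in enumerate(RANKS)'
def aInner (rmap : List (String × String)) (ii : Int) (r1 : String)
    (grid : List (List String)) : Int × String → List (List String)
  | (jj, r2) =>
  let key := if ii == jj then r1 ++ r2 else if ii < jj then r1 ++ r2 ++ "s" else r2 ++ r1 ++ "o"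
  if (PySem.Dict.mk rmap).contains key then
    PySem.List.pySetD grid ii
      (PySem.List.pySetD (PySem.List.pyGetD grid ii []) jj (((PySem.Dict.mk rmap).get? key).getD ""))
  else grid

def grid_from_range_map (rmap : List (String × String)) : List (List String) :=
  let n : Int := pvRANKS.length
  let grid : List (List String) :=
    (PySem.List.pyRange 0 n 1).map (fun _ => (PySem.List.pyRange 0 n 1).map (fun _ => ""))
  (PySem.List.enumerate pvRANKS 0).foldl
    (fun grid p => (PySem.List.enumerate pvRANKS 0).foldl (aInner rmap p.1 p.2) grid) grid

-- ===== PORT B =====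
def pvPOS : PySem.Dict String Int :=
  PySem.Dict.mk [("A",0),("K",1),("Q",2),("J",3),("T",4),("9",5),("8",6),("7",7),("6",8),("5",9),("4",10),("3",11),("2",12)]

-- POS.get(key[n]); key[n] is in range wherever B calls this (guarded by the length tests)
def posOf (key : String) (n : Int) : Option Int :=
  match PySem.Str.pyGet? key n with
  | some c => pvPOS.get? (String.singleton c)
  | none => none

-- body of B's loop: one (key, value) item
def bStep (grid : List (List String)) : String × String → List (List String)
  | (key, value) =>
  if PySem.Str.len key == 2 then
    match posOf key 0, posOf key 1 with
    | some i, some j =>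
        if i == j then
          PySem.List.pySetD grid i (PySem.List.pySetD (PySem.List.pyGetD grid i []) j value)
        else grid
    | _, _ => grid
  else if PySem.Str.len key == 3 then
    match posOf key 0, posOf key 1 with
    | some i, some j =>
        if PySem.Str.pyGet? key 2 == some 's' then
          if i < j then
            PySem.List.pySetD grid i (PySem.List.pySetD (PySem.List.pyGetD grid i []) j value)
          else grid
        else if PySem.Str.pyGet? key 2 == some 'o' then
          if i < j then
            PySem.List.pySetD grid j (PySem.List.pySetD (PySem.List.pyGetD grid j []) i value)
          else grid
        else grid
    | _, _ => grid
  else grid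

def grid_from_range_map_alt (rmap : List (String × String)) : List (List String) :=
  let n : Int := pvRANKS.length
  let grid : List (List String) :=
    (PySem.List.pyRange 0 n 1).map (fun _ => (PySem.List.pyRange 0 n 1).map (fun _ => ""))
  rmap.foldl bStep grid

-- ===== PRECONDITION & SPEC =====
-- Pre_ excludes association lists with duplicate keys: they do not represent a Python dict
-- (A's parameter is a dict, whose keys are necessarily distinct), and on them
-- first-occurrence vs last-occurrence lookup is an artefact of the list encoding.
def Pre_grid_from_range_map (rmap : List (String × String)) : Prop :=
  (rmap.map Prod.fst).Nodup
instance (rmap : List (String × String)) : Decidable (Pre_grid_from_range_map rmap) := by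
  unfold Pre_grid_from_range_map; infer_instance

def pvWitness_grid_from_range_map : (List (String × String)) :=
  [("AA", "1.0"), ("AKs", "0.5"), ("AKo", "0.2"), ("K2o", "x"), ("KAs", "ignored"), ("zz", "")]

def Spec_grid_from_range_map (rmap : List (String × String)) (out : List (List String)) : Prop :=
  out = grid_from_range_map_alt rmap
instance (rmap : List (String × String)) (out : List (List String)) : Decidable (Spec_grid_from_range_map rmap out) := by
  unfold Spec_grid_from_range_map; infer_instance

-- ===== CLAIM (what is proved, stated in full; the proofs are below) =====
def Claim_equal_grid_from_range_map : Prop := ∀ (rmap : List (String × String)), Dom_grid_from_range_map rmap → Pre_grid_from_range_map rmap → Spec_grid_from_range_map rmap (grid_from_range_map rmap)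

-- ===== LEMMAS AND PROOFS =====

-- the rank character at position i
def rcZ (i : Int) : Char := "AKQJT98765432".toList.getD i.toNat ' '

-- the canonical key A generates for cell (i, j)
def keyAtZ (i j : Int) : String :=
  let r1 := pvRANKS.getD i.toNat ""
  let r2 := pvRANKS.getD j.toNat ""
  if i == j then r1 ++ r2 else if i < j then r1 ++ r2 ++ "s" else r2 ++ r1 ++ "o"

-- A's cell value as a lookup
def aCell (rmap : List (String × String)) (k : String) : String :=
  if (PySem.Dict.mk rmap).contains k then ((PySem.Dict.mk rmap).get? k).getD "" else ""

-- grid[i][j] = v  (both ports' write operation)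
def setC (g : List (List String)) (i j : Int) (v : String) : List (List String) :=
  PySem.List.pySetD g i (PySem.List.pySetD (PySem.List.pyGetD g i []) j v)

-- grid[i][j]
def cellC (g : List (List String)) (i j : Int) : String :=
  PySem.List.pyGetD (PySem.List.pyGetD g i []) j ""

-- the 13x13 shape invariant
def P13 (g : List (List String)) : Prop :=
  g.length = 13 ∧ ∀ r ∈ g, r.length = 13

-- the rank-letter index, closed form of pvPOS.get? on a one-character string
def idxC (c : Char) : Option Int :=
  match c with
  | 'A' => some 0 | 'K' => some 1 | 'Q' => some 2 | 'J' => some 3 | 'T' => some 4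
  | '9' => some 5 | '8' => some 6 | '7' => some 7 | '6' => some 8 | '5' => some 9
  | '4' => some 10 | '3' => some 11 | '2' => some 12 | _ => none

theorem pos_get (c : Char) : pvPOS.get? (String.singleton c) = idxC c := by
  by_cases hA : c = 'A'; · subst hA; decide
  by_cases hK : c = 'K'; · subst hK; decide
  by_cases hQ : c = 'Q'; · subst hQ; decide
  by_cases hJ : c = 'J'; · subst hJ; decide
  by_cases hT : c = 'T'; · subst hT; decide
  by_cases h9 : c = '9'; · subst h9; decide
  by_cases h8 : c = '8'; · subst h8; decide
  by_cases h7 : c = '7'; · subst h7; decide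
  by_cases h6 : c = '6'; · subst h6; decide
  by_cases h5 : c = '5'; · subst h5; decide
  by_cases h4 : c = '4'; · subst h4; decide
  by_cases h3 : c = '3'; · subst h3; decide
  by_cases h2 : c = '2'; · subst h2; decide
  have ne : ∀ d : Char, c ≠ d → (String.singleton d == String.singleton c) = false := by
    intro d hd
    rw [beq_eq_false_iff_ne]
    intro h
    rw [← String.toList_inj] at h
    simp at h
    exact hd h.symm
  have hnone : idxC c = none := by
    unfold idxC; split <;> simp_all
  rw [hnone]
  simp only [pvPOS,
      show ("A":String) = String.singleton 'A' from rfl,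
      show ("K":String) = String.singleton 'K' from rfl,
      show ("Q":String) = String.singleton 'Q' from rfl,
      show ("J":String) = String.singleton 'J' from rfl,
      show ("T":String) = String.singleton 'T' from rfl,
      show ("9":String) = String.singleton '9' from rfl,
      show ("8":String) = String.singleton '8' from rfl,
      show ("7":String) = String.singleton '7' from rfl,
      show ("6":String) = String.singleton '6' from rfl,
      show ("5":String) = String.singleton '5' from rfl,
      show ("4":String) = String.singleton '4' from rfl,
      show ("3":String) = String.singleton '3' from rfl,
      show ("2":String) = String.singleton '2' from rfl]
  simp only [PySem.Dict.get?_mk_cons, ne _ hA, ne _ hK, ne _ hQ, ne _ hJ, ne _ hT,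
      ne _ h9, ne _ h8, ne _ h7, ne _ h6, ne _ h5, ne _ h4, ne _ h3, ne _ h2]
  rfl

theorem idxC_some {c : Char} {i : Int} (h : idxC c = some i) :
    0 ≤ i ∧ i < 13 ∧ c = rcZ i := by
  unfold idxC at h
  split at h <;> first
    | (injection h with h; subst_vars; exact ⟨by decide, by decide, by decide⟩)
    | (cases h)

theorem idxC_rc {i : Int} (h0 : 0 ≤ i) (h1 : i < 13) : idxC (rcZ i) = some i := by
  obtain ⟨n, rfl⟩ := Int.eq_ofNat_of_zero_le h0
  have : n < 13 := by exact_mod_cast h1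
  interval_cases n <;> decide

theorem R_toList' {i : Int} (h0 : 0 ≤ i) (h1 : i < 13) :
    (pvRANKS[i.toNat]?.getD "").toList = [rcZ i] := by
  obtain ⟨n, rfl⟩ := Int.eq_ofNat_of_zero_le h0
  have : n < 13 := by exact_mod_cast h1
  interval_cases n <;> decide

theorem keyAtZ_toList {i j : Int} (hi0 : 0 ≤ i) (hi1 : i < 13) (hj0 : 0 ≤ j) (hj1 : j < 13) :
    (keyAtZ i j).toList =
      if i = j then [rcZ i, rcZ i]
      else if i < j then [rcZ i, rcZ j, 's'] else [rcZ j, rcZ i, 'o'] := by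
  unfold keyAtZ
  simp only [beq_iff_eq]
  split_ifs with hb hl
  · subst hb
    simp [String.toList_append, List.getD_eq_getElem?_getD, R_toList' hi0 hi1]
  · simp [String.toList_append, List.getD_eq_getElem?_getD, R_toList' hi0 hi1, R_toList' hj0 hj1,
      show ("s" : String).toList = ['s'] from rfl]
  · simp [String.toList_append, List.getD_eq_getElem?_getD, R_toList' hi0 hi1, R_toList' hj0 hj1,
      show ("o" : String).toList = ['o'] from rfl]

theorem row_len {g : List (List String)} {i : Int} (hg : P13 g) (h0 : 0 ≤ i) (h1 : i < 13) :
    (PySem.List.pyGetD g i []).length = 13 := by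
  obtain ⟨hl, hr⟩ := hg
  rw [PySem.List.pyGetD_of_nonneg g [] h0]
  have hlt : i.toNat < g.length := by omega
  rw [List.getD_eq_getElem?_getD, List.getElem?_eq_getElem hlt]
  exact hr _ (List.getElem_mem hlt)

theorem P13_setC {g : List (List String)} {i j : Int} {v : String} (hg : P13 g)
    (hi0 : 0 ≤ i) (hi1 : i < 13) : P13 (setC g i j v) := by
  obtain ⟨hl, hr⟩ := hg
  constructor
  · rw [setC, PySem.List.length_pySetD]; exact hl
  · intro r hrm
    rw [setC, PySem.List.pySetD_of_nonneg _ _ hi0] at hrm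
    rcases List.mem_or_eq_of_mem_set hrm with h | h
    · exact hr r h
    · subst h
      rw [PySem.List.length_pySetD]
      exact row_len ⟨hl, hr⟩ hi0 hi1

theorem cell_setC_self {g : List (List String)} {i j : Int} {v : String} (hg : P13 g)
    (hi0 : 0 ≤ i) (hi1 : i < 13) (hj0 : 0 ≤ j) (hj1 : j < 13) :
    cellC (setC g i j v) i j = v := by
  have hrl := row_len hg hi0 hi1
  have hil : i.toNat < g.length := by obtain ⟨hl, _⟩ := hg; omega
  have hjl : j.toNat < (PySem.List.pyGetD g i []).length := by rw [hrl]; omega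
  rw [cellC, setC, PySem.List.pySetD_of_nonneg _ _ hi0, PySem.List.pyGetD_of_nonneg _ _ hi0,
    PySem.List.pySetD_of_nonneg _ _ hj0, PySem.List.pyGetD_of_nonneg _ _ hj0]
  simp [List.getD_eq_getElem?_getD, List.getElem?_set, hil, hjl]

theorem cell_setC_ne {g : List (List String)} {i j i' j' : Int} {v : String} (hg : P13 g)
    (hi0 : 0 ≤ i) (hi1 : i < 13) (hj0 : 0 ≤ j) (hj1 : j < 13)
    (hi0' : 0 ≤ i') (hi1' : i' < 13) (hj0' : 0 ≤ j') (hj1' : j' < 13)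
    (hne : (i, j) ≠ (i', j')) :
    cellC (setC g i' j' v) i j = cellC g i j := by
  have hrl := row_len hg hi0' hi1'
  have hil : i'.toNat < g.length := by obtain ⟨hl, _⟩ := hg; omega
  rw [cellC, setC, PySem.List.pySetD_of_nonneg _ _ hi0']
  by_cases hii : i' = i
  · subst hii
    have hjj : j ≠ j' := fun h => hne (by rw [h])
    have hjn : ¬ j'.toNat = j.toNat := by omega
    rw [PySem.List.pySetD_of_nonneg _ _ hj0']
    simp [cellC, List.getD_eq_getElem?_getD, List.getElem?_set, hil, hjn,
      PySem.List.pyGetD_of_nonneg _ _ hi0, PySem.List.pyGetD_of_nonneg _ _ hj0]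
  · have hin : ¬ i'.toNat = i.toNat := by omega
    simp [cellC, List.getD_eq_getElem?_getD, List.getElem?_set, hin,
      PySem.List.pyGetD_of_nonneg _ _ hi0]

-- helpers to evaluate B's parsing of a key
theorem posOf0 {k : String} {a : Char} {t : List Char} (hk : k.toList = a :: t) :
    posOf k 0 = idxC a := by
  have h : PySem.Str.pyGet? k 0 = some a := by simp [hk]
  unfold posOf
  rw [h]
  exact pos_get a

theorem posOf1 {k : String} {a b : Char} {t : List Char} (hk : k.toList = a :: b :: t) :
    posOf k 1 = idxC b := by
  have h : PySem.Str.pyGet? k 1 = some b := by simp [hk, PySem.List.pyGet?, PySem.List.pyIdx?]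
  unfold posOf
  rw [h]
  exact pos_get b

theorem get2 {k : String} {a b c : Char} (hk : k.toList = [a, b, c]) :
    PySem.Str.pyGet? k 2 = some c := by
  simp [hk, PySem.List.pyGet?, PySem.List.pyIdx?]

theorem rcZ_inj {i i' : Int} (hi0 : 0 ≤ i) (hi1 : i < 13) (hi0' : 0 ≤ i') (hi1' : i' < 13)
    (h : rcZ i = rcZ i') : i = i' := by
  have h1 := idxC_rc hi0 hi1
  rw [h, idxC_rc hi0' hi1'] at h1
  injection h1 with h1
  omega

theorem keyAtZ_inj {i j i' j' : Int} (hi0 : 0 ≤ i) (hi1 : i < 13) (hj0 : 0 ≤ j) (hj1 : j < 13)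
    (hi0' : 0 ≤ i') (hi1' : i' < 13) (hj0' : 0 ≤ j') (hj1' : j' < 13)
    (h : keyAtZ i j = keyAtZ i' j') : i = i' ∧ j = j' := by
  have ht := congrArg String.toList h
  rw [keyAtZ_toList hi0 hi1 hj0 hj1, keyAtZ_toList hi0' hi1' hj0' hj1'] at ht
  by_cases c1 : i = j
  · rw [if_pos c1] at ht
    by_cases d1 : i' = j'
    · rw [if_pos d1] at ht
      injection ht with e1 _
      have := rcZ_inj hi0 hi1 hi0' hi1' e1
      omega
    · rw [if_neg d1] at ht
      split_ifs at ht <;> exact absurd (congrArg List.length ht) (by simp)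
  · rw [if_neg c1] at ht
    by_cases c2 : i < j
    · rw [if_pos c2] at ht
      by_cases d1 : i' = j'
      · rw [if_pos d1] at ht
        exact absurd (congrArg List.length ht) (by simp)
      · rw [if_neg d1] at ht
        by_cases d2 : i' < j'
        · rw [if_pos d2] at ht
          injection ht with e1 ht; injection ht with e2 _
          exact ⟨rcZ_inj hi0 hi1 hi0' hi1' e1, rcZ_inj hj0 hj1 hj0' hj1' e2⟩
        · rw [if_neg d2] at ht
          injection ht with _ ht; injection ht with _ ht; injection ht with e3 _
          exact absurd e3 (by decide)
    · rw [if_neg c2] at ht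
      by_cases d1 : i' = j'
      · rw [if_pos d1] at ht
        exact absurd (congrArg List.length ht) (by simp)
      · rw [if_neg d1] at ht
        by_cases d2 : i' < j'
        · rw [if_pos d2] at ht
          injection ht with _ ht; injection ht with _ ht; injection ht with e3 _
          exact absurd e3 (by decide)
        · rw [if_neg d2] at ht
          injection ht with e1 ht; injection ht with e2 _
          exact ⟨rcZ_inj hi0 hi1 hi0' hi1' e2, rcZ_inj hj0 hj1 hj0' hj1' e1⟩

-- B's step writes exactly the cell whose canonical key the incoming key is
theorem bStep_dichotomy (g : List (List String)) (k v : String) :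
    (∃ i j : Int, 0 ≤ i ∧ i < 13 ∧ 0 ≤ j ∧ j < 13 ∧ k = keyAtZ i j ∧ bStep g (k, v) = setC g i j v) ∨
    (bStep g (k, v) = g ∧ ∀ i j : Int, 0 ≤ i → i < 13 → 0 ≤ j → j < 13 → k ≠ keyAtZ i j) := by
  obtain ⟨l, hl⟩ : ∃ l, k.toList = l := ⟨_, rfl⟩
  have klen : PySem.Str.len k = (l.length : Int) := by simp [hl]
  rcases l with _ | ⟨a, _ | ⟨b, _ | ⟨c, _ | ⟨d, t⟩⟩⟩⟩
  -- length 0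
  · have h2 : (PySem.Str.len k == 2) = false := by rw [klen]; rfl
    have h3 : (PySem.Str.len k == 3) = false := by rw [klen]; rfl
    right
    refine ⟨by unfold bStep; dsimp only; rw [h2, h3] <;> rfl, ?_⟩
    intro i j hi0 hi1 hj0 hj1 heq
    have ht := congrArg String.toList heq
    rw [hl, keyAtZ_toList hi0 hi1 hj0 hj1] at ht
    split_ifs at ht <;> exact absurd (congrArg List.length ht) (by simp)
  -- length 1
  · have h2 : (PySem.Str.len k == 2) = false := by rw [klen]; rfl
    have h3 : (PySem.Str.len k == 3) = false := by rw [klen]; rfl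
    right
    refine ⟨by unfold bStep; dsimp only; rw [h2, h3] <;> rfl, ?_⟩
    intro i j hi0 hi1 hj0 hj1 heq
    have ht := congrArg String.toList heq
    rw [hl, keyAtZ_toList hi0 hi1 hj0 hj1] at ht
    split_ifs at ht <;> exact absurd (congrArg List.length ht) (by simp)
  -- length 2
  · have h2 : (PySem.Str.len k == 2) = true := by rw [klen]; rfl
    have p0 := posOf0 hl
    have p1 := posOf1 hl
    have notlen3 : ∀ {i j : Int}, i ≠ j → 0 ≤ i → i < 13 → 0 ≤ j → j < 13 →
        k ≠ keyAtZ i j := by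
      intro i j cij hi0 hi1 hj0 hj1 heq
      have ht := congrArg String.toList heq
      rw [hl, keyAtZ_toList hi0 hi1 hj0 hj1, if_neg cij] at ht
      split_ifs at ht <;> exact absurd (congrArg List.length ht) (by simp)
    rcases ca : idxC a with _ | i0
    · right
      refine ⟨by unfold bStep; dsimp only; rw [h2, p0, ca] <;> rfl, ?_⟩
      intro i j hi0 hi1 hj0 hj1 heq
      by_cases cij : i = j
      · have ht := congrArg String.toList heq
        rw [hl, keyAtZ_toList hi0 hi1 hj0 hj1, if_pos cij] at ht
        injection ht with e1 _
        rw [e1, idxC_rc hi0 hi1] at ca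
        cases ca
      · exact notlen3 cij hi0 hi1 hj0 hj1 heq
    · rcases cb : idxC b with _ | j0
      · right
        refine ⟨by unfold bStep; dsimp only; rw [h2, p0, ca, p1, cb] <;> rfl, ?_⟩
        intro i j hi0 hi1 hj0 hj1 heq
        by_cases cij : i = j
        · have ht := congrArg String.toList heq
          rw [hl, keyAtZ_toList hi0 hi1 hj0 hj1, if_pos cij] at ht
          injection ht with _ ht
          injection ht with e2 _
          rw [e2, idxC_rc hi0 hi1] at cb
          cases cb
        · exact notlen3 cij hi0 hi1 hj0 hj1 heq
      · obtain ⟨hi00, hi01, ha⟩ := idxC_some ca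
        obtain ⟨hj00, hj01, hb⟩ := idxC_some cb
        by_cases hij : i0 = j0
        · subst hij
          left
          refine ⟨i0, i0, hi00, hi01, hi00, hi01, ?_, ?_⟩
          · rw [← String.toList_inj, hl, keyAtZ_toList hi00 hi01 hi00 hi01, if_pos rfl,
              ha, hb]
          · unfold bStep
            dsimp only
            rw [h2, p0, ca, p1, cb]
            dsimp only
            rw [beq_self_eq_true]
            rfl
        · right
          have hb' : (i0 == j0) = false := by
            rw [beq_eq_false_iff_ne]; exact hij
          refine ⟨by unfold bStep; dsimp only; rw [h2, p0, ca, p1, cb]; dsimp only; rw [hb'] <;> rfl, ?_⟩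
          intro i j hi0 hi1 hj0 hj1 heq
          by_cases cij : i = j
          · have ht := congrArg String.toList heq
            rw [hl, keyAtZ_toList hi0 hi1 hj0 hj1, if_pos cij] at ht
            injection ht with e1 ht
            injection ht with e2 _
            apply hij
            have u1 : i0 = i := rcZ_inj hi00 hi01 hi0 hi1 (ha.symm.trans e1)
            have u2 : j0 = i := rcZ_inj hj00 hj01 hi0 hi1 (hb.symm.trans e2)
            omega
          · exact notlen3 cij hi0 hi1 hj0 hj1 heq
  -- length 3
  · have h2 : (PySem.Str.len k == 2) = false := by rw [klen]; rfl
    have h3 : (PySem.Str.len k == 3) = true := by rw [klen]; rfl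
    have p0 := posOf0 hl
    have p1 := posOf1 hl
    have p2 := get2 hl
    have notlen2 : ∀ {i j : Int}, i = j → 0 ≤ i → i < 13 → 0 ≤ j → j < 13 →
        k ≠ keyAtZ i j := by
      intro i j cij hi0 hi1 hj0 hj1 heq
      have ht := congrArg String.toList heq
      rw [hl, keyAtZ_toList hi0 hi1 hj0 hj1, if_pos cij] at ht
      exact absurd (congrArg List.length ht) (by simp)
    rcases ca : idxC a with _ | i0
    · right
      refine ⟨by unfold bStep; dsimp only; rw [h2, h3, p0, ca] <;> rfl, ?_⟩
      intro i j hi0 hi1 hj0 hj1 heq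
      by_cases cij : i = j
      · exact notlen2 cij hi0 hi1 hj0 hj1 heq
      · have ht := congrArg String.toList heq
        rw [hl, keyAtZ_toList hi0 hi1 hj0 hj1, if_neg cij] at ht
        by_cases clt : i < j
        · rw [if_pos clt] at ht
          injection ht with e1 _
          rw [e1, idxC_rc hi0 hi1] at ca
          cases ca
        · rw [if_neg clt] at ht
          injection ht with e1 _
          rw [e1, idxC_rc hj0 hj1] at ca
          cases ca
    · rcases cb : idxC b with _ | j0
      · right
        refine ⟨by unfold bStep; dsimp only; rw [h2, h3, p0, ca, p1, cb] <;> rfl, ?_⟩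
        intro i j hi0 hi1 hj0 hj1 heq
        by_cases cij : i = j
        · exact notlen2 cij hi0 hi1 hj0 hj1 heq
        · have ht := congrArg String.toList heq
          rw [hl, keyAtZ_toList hi0 hi1 hj0 hj1, if_neg cij] at ht
          by_cases clt : i < j
          · rw [if_pos clt] at ht
            injection ht with _ ht
            injection ht with e2 _
            rw [e2, idxC_rc hj0 hj1] at cb
            cases cb
          · rw [if_neg clt] at ht
            injection ht with _ ht
            injection ht with e2 _
            rw [e2, idxC_rc hi0 hi1] at cb
            cases cb
      · obtain ⟨hi00, hi01, ha⟩ := idxC_some ca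
        obtain ⟨hj00, hj01, hb⟩ := idxC_some cb
        by_cases hcs : c = 's'
        · subst hcs
          have ps : (PySem.Str.pyGet? k 2 == some 's') = true := by rw [p2]; rfl
          by_cases hij : i0 < j0
          · left
            refine ⟨i0, j0, hi00, hi01, hj00, hj01, ?_, ?_⟩
            · rw [← String.toList_inj, hl, keyAtZ_toList hi00 hi01 hj00 hj01,
                if_neg (by omega), if_pos hij, ha, hb]
            · unfold bStep
              dsimp only
              rw [h2, h3, p0, ca, p1, cb, ps]
              dsimp only
              simp only [if_pos hij]
              rfl
          · right
            refine ⟨by unfold bStep; dsimp only; rw [h2, h3, p0, ca, p1, cb, ps]; dsimp only; simp only [if_neg hij] <;> rfl, ?_⟩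
            intro i j hi0 hi1 hj0 hj1 heq
            by_cases cij : i = j
            · exact notlen2 cij hi0 hi1 hj0 hj1 heq
            · have ht := congrArg String.toList heq
              rw [hl, keyAtZ_toList hi0 hi1 hj0 hj1, if_neg cij] at ht
              by_cases clt : i < j
              · rw [if_pos clt] at ht
                injection ht with e1 ht
                injection ht with e2 _
                apply hij
                have u1 : i0 = i := rcZ_inj hi00 hi01 hi0 hi1 (ha.symm.trans e1)
                have u2 : j0 = j := rcZ_inj hj00 hj01 hj0 hj1 (hb.symm.trans e2)
                omega
              · rw [if_neg clt] at ht
                injection ht with _ ht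
                injection ht with _ ht
                injection ht with e3 _
                exact absurd e3 (by decide)
        · by_cases hco : c = 'o'
          · subst hco
            have ps : (PySem.Str.pyGet? k 2 == some 's') = false := by rw [p2]; rfl
            have po : (PySem.Str.pyGet? k 2 == some 'o') = true := by rw [p2]; rfl
            by_cases hij : i0 < j0
            · left
              refine ⟨j0, i0, hj00, hj01, hi00, hi01, ?_, ?_⟩
              · rw [← String.toList_inj, hl, keyAtZ_toList hj00 hj01 hi00 hi01,
                  if_neg (by omega), if_neg (by omega), ha, hb]
              · unfold bStep
                dsimp only
                rw [h2, h3, p0, ca, p1, cb, ps, po]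
                dsimp only
                simp only [if_pos hij]
                rfl
            · right
              refine ⟨by unfold bStep; dsimp only; rw [h2, h3, p0, ca, p1, cb, ps, po]; dsimp only; simp only [if_neg hij] <;> rfl, ?_⟩
              intro i j hi0 hi1 hj0 hj1 heq
              by_cases cij : i = j
              · exact notlen2 cij hi0 hi1 hj0 hj1 heq
              · have ht := congrArg String.toList heq
                rw [hl, keyAtZ_toList hi0 hi1 hj0 hj1, if_neg cij] at ht
                by_cases clt : i < j
                · rw [if_pos clt] at ht
                  injection ht with _ ht
                  injection ht with _ ht
                  injection ht with e3 _
                  exact absurd e3 (by decide)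
                · rw [if_neg clt] at ht
                  injection ht with e1 ht
                  injection ht with e2 _
                  apply hij
                  have u1 : i0 = j := rcZ_inj hi00 hi01 hj0 hj1 (ha.symm.trans e1)
                  have u2 : j0 = i := rcZ_inj hj00 hj01 hi0 hi1 (hb.symm.trans e2)
                  omega
          · right
            have ps : (PySem.Str.pyGet? k 2 == some 's') = false := by
              rw [p2, beq_eq_false_iff_ne]
              intro h
              exact hcs (Option.some.inj h)
            have po : (PySem.Str.pyGet? k 2 == some 'o') = false := by
              rw [p2, beq_eq_false_iff_ne]
              intro h
              exact hco (Option.some.inj h)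
            refine ⟨by unfold bStep; dsimp only; rw [h2, h3, p0, ca, p1, cb, ps, po] <;> rfl, ?_⟩
            intro i j hi0 hi1 hj0 hj1 heq
            by_cases cij : i = j
            · exact notlen2 cij hi0 hi1 hj0 hj1 heq
            · have ht := congrArg String.toList heq
              rw [hl, keyAtZ_toList hi0 hi1 hj0 hj1, if_neg cij] at ht
              by_cases clt : i < j
              · rw [if_pos clt] at ht
                injection ht with _ ht
                injection ht with _ ht
                injection ht with e3 _
                exact hcs e3
              · rw [if_neg clt] at ht
                injection ht with _ ht
                injection ht with _ ht
                injection ht with e3 _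
                exact hco e3
  -- length ≥ 4
  · have h2 : (PySem.Str.len k == 2) = false := by
      rw [klen, beq_eq_false_iff_ne]
      intro h
      simp at h
      omega
    have h3 : (PySem.Str.len k == 3) = false := by
      rw [klen, beq_eq_false_iff_ne]
      intro h
      simp at h
      omega
    right
    refine ⟨by unfold bStep; dsimp only; rw [h2, h3] <;> rfl, ?_⟩
    intro i j hi0 hi1 hj0 hj1 heq
    have ht := congrArg String.toList heq
    rw [hl, keyAtZ_toList hi0 hi1 hj0 hj1] at ht
    split_ifs at ht <;> exact absurd (congrArg List.length ht) (by simp)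

-- B's fold, cellwise
theorem B_fold (rmap : List (String × String)) : ∀ g : List (List String),
    (rmap.map Prod.fst).Nodup → P13 g →
    P13 (rmap.foldl bStep g) ∧
    ∀ i j : Int, 0 ≤ i → i < 13 → 0 ≤ j → j < 13 →
      cellC (rmap.foldl bStep g) i j =
        match (PySem.Dict.mk rmap).get? (keyAtZ i j) with
        | some v => v
        | none => cellC g i j := by
  induction rmap with
  | nil =>
    intro g _ hg
    exact ⟨hg, fun i j _ _ _ _ => rfl⟩
  | cons p rest ih =>
    intro g hnd hg
    obtain ⟨k, v⟩ := p
    have hk : k ∉ rest.map Prod.fst := (List.nodup_cons.mp hnd).1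
    have hnd' : (rest.map Prod.fst).Nodup := (List.nodup_cons.mp hnd).2
    rcases bStep_dichotomy g k v with ⟨i0, j0, hi00, hi01, hj00, hj01, hkey, heq⟩ | ⟨heq, hne⟩
    · have hg' : P13 (setC g i0 j0 v) := P13_setC hg hi00 hi01
      obtain ⟨hP, hcell⟩ := ih (setC g i0 j0 v) hnd' hg'
      rw [List.foldl_cons, heq]
      refine ⟨hP, ?_⟩
      intro i j hi0 hi1 hj0 hj1
      rw [hcell i j hi0 hi1 hj0 hj1, PySem.Dict.get?_mk_cons]
      by_cases he : keyAtZ i j = k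
      · have hbeq : (k == keyAtZ i j) = true := by rw [beq_iff_eq]; exact he.symm
        rw [hbeq]
        obtain ⟨e1, e2⟩ := keyAtZ_inj hi0 hi1 hj0 hj1 hi00 hi01 hj00 hj01 (he.trans hkey)
        subst e1
        subst e2
        have hnone : (PySem.Dict.mk rest).get? (keyAtZ i j) = none := by
          rw [PySem.Dict.get?_eq_none_iff_not_mem_keys, PySem.Dict.keys_mk]
          rw [← hkey]
          exact hk
        rw [hnone]
        exact cell_setC_self hg hi0 hi1 hj0 hj1
      · have hbeq : (k == keyAtZ i j) = false := by
          rw [beq_eq_false_iff_ne]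
          exact fun h => he h.symm
        rw [hbeq]
        have hne0 : (i, j) ≠ (i0, j0) := by
          intro h
          injection h with e1 e2
          subst e1; subst e2
          exact he hkey.symm
        cases hres : (PySem.Dict.mk rest).get? (keyAtZ i j)
        · exact cell_setC_ne hg hi0 hi1 hj0 hj1 hi00 hi01 hj00 hj01 hne0
        · rfl
    · rw [List.foldl_cons, heq]
      obtain ⟨hP, hcell⟩ := ih g hnd' hg
      refine ⟨hP, ?_⟩
      intro i j hi0 hi1 hj0 hj1
      rw [hcell i j hi0 hi1 hj0 hj1, PySem.Dict.get?_mk_cons]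
      have hbeq : (k == keyAtZ i j) = false := by
        rw [beq_eq_false_iff_ne]
        exact hne i j hi0 hi1 hj0 hj1
      rw [hbeq]
      rfl

-- A's inner loop, as a fold over row ii
def aRowStep (rmap : List (String × String)) (ii : Int) (r1 : String)
    (row : List String) : Int × String → List String
  | (jj, r2) =>
  let key := if ii == jj then r1 ++ r2 else if ii < jj then r1 ++ r2 ++ "s" else r2 ++ r1 ++ "o"
  if (PySem.Dict.mk rmap).contains key then
    PySem.List.pySetD row jj (((PySem.Dict.mk rmap).get? key).getD "")
  else row

-- index juggling helpers for pySetD/pyGetD at nonnegative in-range indices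
theorem setD_getD_self {g : List (List String)} {i : Int} (h0 : 0 ≤ i)
    (h1 : i < (g.length : Int)) :
    PySem.List.pySetD g i (PySem.List.pyGetD g i []) = g := by
  have hlt : i.toNat < g.length := by omega
  rw [PySem.List.pySetD_of_nonneg _ _ h0, PySem.List.pyGetD_of_nonneg _ _ h0,
    List.getD_eq_getElem?_getD, List.getElem?_eq_getElem hlt, Option.getD_some,
    List.set_getElem_self]

theorem getD_setD_self {α : Type} {g : List α} {i : Int} {r d : α} (h0 : 0 ≤ i)
    (h1 : i < (g.length : Int)) :
    PySem.List.pyGetD (PySem.List.pySetD g i r) i d = r := by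
  have hlt : i.toNat < g.length := by omega
  rw [PySem.List.pySetD_of_nonneg _ _ h0, PySem.List.pyGetD_of_nonneg _ _ h0,
    List.getD_eq_getElem?_getD, List.getElem?_set]
  simp [hlt]

theorem getD_setD_ne {α : Type} {g : List α} {i j : Int} {r d : α} (hi : 0 ≤ i) (hj : 0 ≤ j)
    (hne : i ≠ j) :
    PySem.List.pyGetD (PySem.List.pySetD g i r) j d = PySem.List.pyGetD g j d := by
  have hnat : i.toNat ≠ j.toNat := by omega
  rw [PySem.List.pySetD_of_nonneg _ _ hi, PySem.List.pyGetD_of_nonneg _ _ hj,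
    PySem.List.pyGetD_of_nonneg _ _ hj, List.getD_eq_getElem?_getD,
    List.getD_eq_getElem?_getD, List.getElem?_set, if_neg hnat]

theorem setD_setD_self {α : Type} {g : List α} {i : Int} {r1 r2 : α} (h0 : 0 ≤ i) :
    PySem.List.pySetD (PySem.List.pySetD g i r1) i r2 = PySem.List.pySetD g i r2 := by
  rw [PySem.List.pySetD_of_nonneg _ _ h0, PySem.List.pySetD_of_nonneg _ _ h0,
    PySem.List.pySetD_of_nonneg _ _ h0, List.set_set]

theorem L_innerA (rmap : List (String × String)) (ii : Int) (r1 : String)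
    (l : List (Int × String)) : ∀ g : List (List String), 0 ≤ ii → ii < (g.length : Int) →
    l.foldl (aInner rmap ii r1) g =
      PySem.List.pySetD g ii (l.foldl (aRowStep rmap ii r1) (PySem.List.pyGetD g ii [])) := by
  induction l with
  | nil =>
    intro g h0 h1
    exact (setD_getD_self h0 h1).symm
  | cons q t ih =>
    intro g h0 h1
    obtain ⟨jj, r2⟩ := q
    rw [List.foldl_cons, List.foldl_cons]
    by_cases hc : (PySem.Dict.mk rmap).contains
        (if ii == jj then r1 ++ r2 else if ii < jj then r1 ++ r2 ++ "s" else r2 ++ r1 ++ "o") = true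
    · have ha : aInner rmap ii r1 g (jj, r2) =
          PySem.List.pySetD g ii (PySem.List.pySetD (PySem.List.pyGetD g ii []) jj
            (((PySem.Dict.mk rmap).get?
              (if ii == jj then r1 ++ r2 else if ii < jj then r1 ++ r2 ++ "s" else r2 ++ r1 ++ "o")).getD "")) := by
        unfold aInner
        dsimp only
        rw [if_pos hc]
      have hr : aRowStep rmap ii r1 (PySem.List.pyGetD g ii []) (jj, r2) =
          PySem.List.pySetD (PySem.List.pyGetD g ii []) jj
            (((PySem.Dict.mk rmap).get?
              (if ii == jj then r1 ++ r2 else if ii < jj then r1 ++ r2 ++ "s" else r2 ++ r1 ++ "o")).getD "") := by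
        unfold aRowStep
        dsimp only
        rw [if_pos hc]
      rw [ha, hr, ih _ h0 (by rw [PySem.List.length_pySetD]; exact h1),
        getD_setD_self h0 h1, setD_setD_self h0]
    · have ha : aInner rmap ii r1 g (jj, r2) = g := by
        unfold aInner
        dsimp only
        rw [if_neg hc]
      have hr : aRowStep rmap ii r1 (PySem.List.pyGetD g ii []) (jj, r2) =
          PySem.List.pyGetD g ii [] := by
        unfold aRowStep
        dsimp only
        rw [if_neg hc]
      rw [ha, hr, ih g h0 h1]

theorem A_row (rmap : List (String × String)) (ii : Int) (r1 : String)
    (l : List (Int × String)) : ∀ row : List String,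
    (l.map Prod.fst).Nodup → (∀ q ∈ l, 0 ≤ q.1 ∧ q.1 < (row.length : Int)) →
    (l.foldl (aRowStep rmap ii r1) row).length = row.length ∧
    (∀ q ∈ l, PySem.List.pyGetD (l.foldl (aRowStep rmap ii r1) row) q.1 "" =
       (if (PySem.Dict.mk rmap).contains (if ii == q.1 then r1 ++ q.2 else if ii < q.1 then r1 ++ q.2 ++ "s" else q.2 ++ r1 ++ "o") then
          ((PySem.Dict.mk rmap).get? (if ii == q.1 then r1 ++ q.2 else if ii < q.1 then r1 ++ q.2 ++ "s" else q.2 ++ r1 ++ "o")).getD ""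
        else PySem.List.pyGetD row q.1 "")) ∧
    (∀ j : Int, 0 ≤ j → (∀ q ∈ l, q.1 ≠ j) →
       PySem.List.pyGetD (l.foldl (aRowStep rmap ii r1) row) j "" = PySem.List.pyGetD row j "") := by
  induction l with
  | nil =>
    intro row _ _
    exact ⟨rfl, fun q hq => absurd hq (List.not_mem_nil), fun _ _ _ => rfl⟩
  | cons q t ih =>
    intro row hnd hbd
    obtain ⟨jj, r2⟩ := q
    have hjjb := hbd _ List.mem_cons_self
    have hjj0 : 0 ≤ jj := hjjb.1
    have hnotin : ∀ q' ∈ t, q'.1 ≠ jj := by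
      intro q' hq' he
      have hni := (List.nodup_cons.mp hnd).1
      have hmem : q'.1 ∈ t.map Prod.fst := List.mem_map_of_mem hq'
      rw [he] at hmem
      exact hni hmem
    have hnd' : (t.map Prod.fst).Nodup := (List.nodup_cons.mp hnd).2
    by_cases hc : (PySem.Dict.mk rmap).contains
        (if ii == jj then r1 ++ r2 else if ii < jj then r1 ++ r2 ++ "s" else r2 ++ r1 ++ "o") = true
    · have hr : aRowStep rmap ii r1 row (jj, r2) =
          PySem.List.pySetD row jj
            (((PySem.Dict.mk rmap).get?
              (if ii == jj then r1 ++ r2 else if ii < jj then r1 ++ r2 ++ "s" else r2 ++ r1 ++ "o")).getD "") := by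
        unfold aRowStep
        dsimp only
        rw [if_pos hc]
      have hrowlen : (aRowStep rmap ii r1 row (jj, r2)).length = row.length := by
        rw [hr, PySem.List.length_pySetD]
      have hbd' : ∀ q' ∈ t, 0 ≤ q'.1 ∧ q'.1 < ((aRowStep rmap ii r1 row (jj, r2)).length : Int) := by
        intro q' hq'
        rw [hrowlen]
        exact hbd q' (List.mem_cons_of_mem _ hq')
      obtain ⟨ihlen, ihmem, ihun⟩ := ih (aRowStep rmap ii r1 row (jj, r2)) hnd' hbd'
      rw [List.foldl_cons]
      refine ⟨ihlen.trans hrowlen, ?_, ?_⟩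
      · intro q' hq'
        rcases List.mem_cons.mp hq' with rfl | hq'
        · rw [ihun jj hjj0 hnotin, hr, getD_setD_self hjj0 hjjb.2]
          dsimp only
          rw [if_pos hc]
        · rw [ihmem q' hq', hr]
          by_cases hc' : (PySem.Dict.mk rmap).contains
              (if ii == q'.1 then r1 ++ q'.2 else if ii < q'.1 then r1 ++ q'.2 ++ "s" else q'.2 ++ r1 ++ "o") = true
          · rw [if_pos hc', if_pos hc']
          · rw [if_neg hc', if_neg hc', getD_setD_ne hjj0 (hbd q' (List.mem_cons_of_mem _ hq')).1
              (fun he => hnotin q' hq' he.symm)]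
      · intro j hj0 hne
        rw [ihun j hj0 (fun q' hq' => hne q' (List.mem_cons_of_mem _ hq')), hr,
          getD_setD_ne hjj0 hj0 (hne _ List.mem_cons_self)]
    · have hr : aRowStep rmap ii r1 row (jj, r2) = row := by
        unfold aRowStep
        dsimp only
        rw [if_neg hc]
      obtain ⟨ihlen, ihmem, ihun⟩ := ih (aRowStep rmap ii r1 row (jj, r2)) hnd'
        (by rw [hr]; exact fun q' hq' => hbd q' (List.mem_cons_of_mem _ hq'))
      rw [List.foldl_cons]
      refine ⟨by rw [ihlen, hr], ?_, ?_⟩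
      · intro q' hq'
        rcases List.mem_cons.mp hq' with rfl | hq'
        · rw [ihun jj hjj0 hnotin, hr]
          dsimp only
          rw [if_neg hc]
        · rw [ihmem q' hq', hr]
      · intro j hj0 hne
        rw [ihun j hj0 (fun q' hq' => hne q' (List.mem_cons_of_mem _ hq')), hr]

theorem enum_nodup : ((PySem.List.enumerate pvRANKS 0).map Prod.fst).Nodup := by decide

theorem enum_bounds : ∀ q ∈ PySem.List.enumerate pvRANKS 0, 0 ≤ q.1 ∧ q.1 < 13 := by decide

theorem A_outer (rmap : List (String × String)) (l : List (Int × String)) :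
    ∀ g : List (List String),
    (l.map Prod.fst).Nodup → (∀ p ∈ l, 0 ≤ p.1 ∧ p.1 < 13) → P13 g →
    P13 (l.foldl (fun grid p => (PySem.List.enumerate pvRANKS 0).foldl (aInner rmap p.1 p.2) grid) g) ∧
    (∀ p ∈ l, PySem.List.pyGetD (l.foldl (fun grid p => (PySem.List.enumerate pvRANKS 0).foldl (aInner rmap p.1 p.2) grid) g) p.1 [] =
       (PySem.List.enumerate pvRANKS 0).foldl (aRowStep rmap p.1 p.2) (PySem.List.pyGetD g p.1 [])) ∧
    (∀ i : Int, 0 ≤ i → (∀ p ∈ l, p.1 ≠ i) →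
       PySem.List.pyGetD (l.foldl (fun grid p => (PySem.List.enumerate pvRANKS 0).foldl (aInner rmap p.1 p.2) grid) g) i [] = PySem.List.pyGetD g i []) := by
  induction l with
  | nil =>
    intro g _ _ hg
    exact ⟨hg, fun p hp => absurd hp (List.not_mem_nil), fun _ _ _ => rfl⟩
  | cons p t ih =>
    intro g hnd hbd hg
    obtain ⟨i1, r1⟩ := p
    have hi1b := hbd _ List.mem_cons_self
    have hlen13 : (g.length : Int) = 13 := by rw [hg.1]; rfl
    have hi1len : i1 < (g.length : Int) := by omega
    have hnotin : ∀ p' ∈ t, p'.1 ≠ i1 := by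
      intro p' hp' he
      have hni := (List.nodup_cons.mp hnd).1
      have hmem : p'.1 ∈ t.map Prod.fst := List.mem_map_of_mem hp'
      rw [he] at hmem
      exact hni hmem
    have hnd' : (t.map Prod.fst).Nodup := (List.nodup_cons.mp hnd).2
    have hbd' : ∀ p' ∈ t, 0 ≤ p'.1 ∧ p'.1 < 13 := fun p' hp' => hbd p' (List.mem_cons_of_mem _ hp')
    have hinner := L_innerA rmap i1 r1 (PySem.List.enumerate pvRANKS 0) g hi1b.1 hi1len
    have hrbd : ∀ q ∈ PySem.List.enumerate pvRANKS 0,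
        0 ≤ q.1 ∧ q.1 < ((PySem.List.pyGetD g i1 []).length : Int) := by
      intro q hq
      rw [row_len hg hi1b.1 hi1b.2]
      exact_mod_cast enum_bounds q hq
    obtain ⟨hrlen, _, _⟩ := A_row rmap i1 r1 (PySem.List.enumerate pvRANKS 0)
      (PySem.List.pyGetD g i1 []) enum_nodup hrbd
    have hg' : P13 ((PySem.List.enumerate pvRANKS 0).foldl (aInner rmap i1 r1) g) := by
      rw [hinner]
      refine ⟨by rw [PySem.List.length_pySetD]; exact hg.1, ?_⟩
      intro r hrm
      rw [PySem.List.pySetD_of_nonneg _ _ hi1b.1] at hrm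
      rcases List.mem_or_eq_of_mem_set hrm with h | h
      · exact hg.2 r h
      · rw [h, hrlen]
        exact row_len hg hi1b.1 hi1b.2
    obtain ⟨ihP, ihmem, ihun⟩ := ih ((PySem.List.enumerate pvRANKS 0).foldl (aInner rmap i1 r1) g) hnd' hbd' hg'
    rw [List.foldl_cons]
    refine ⟨ihP, ?_, ?_⟩
    · intro p' hp'
      rcases List.mem_cons.mp hp' with rfl | hp'
      · rw [ihun i1 hi1b.1 hnotin, hinner, getD_setD_self hi1b.1 hi1len]
      · rw [ihmem p' hp', hinner,
          getD_setD_ne hi1b.1 (hbd' p' hp').1 (fun he => hnotin p' hp' he.symm)]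
    · intro i hi0 hne
      rw [ihun i hi0 (fun p' hp' => hne p' (List.mem_cons_of_mem _ hp')), hinner,
        getD_setD_ne hi1b.1 hi0 (hne _ List.mem_cons_self)]

theorem mem_enum {i : Int} (h0 : 0 ≤ i) (h1 : i < 13) :
    (i, pvRANKS.getD i.toNat "") ∈ PySem.List.enumerate pvRANKS 0 := by
  obtain ⟨n, rfl⟩ := Int.eq_ofNat_of_zero_le h0
  have : n < 13 := by exact_mod_cast h1
  interval_cases n <;> decide

-- the empty grid both ports start from
def g0 : List (List String) :=
  (PySem.List.pyRange 0 (pvRANKS.length : Int) 1).map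
    (fun _ => (PySem.List.pyRange 0 (pvRANKS.length : Int) 1).map (fun _ => ""))

theorem P13_g0 : P13 g0 := ⟨rfl, by decide⟩

theorem g0_cell {i j : Int} (h0 : 0 ≤ i) (h1 : i < 13) (hj0 : 0 ≤ j) (hj1 : j < 13) :
    cellC g0 i j = "" := by
  obtain ⟨n, rfl⟩ := Int.eq_ofNat_of_zero_le h0
  obtain ⟨m, rfl⟩ := Int.eq_ofNat_of_zero_le hj0
  have hn : n < 13 := by exact_mod_cast h1
  have hm : m < 13 := by exact_mod_cast hj1
  unfold cellC
  rw [PySem.List.pyGetD_of_nonneg _ _ (by omega : (0:Int) ≤ (n:Int)),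
    PySem.List.pyGetD_of_nonneg _ _ (by omega : (0:Int) ≤ (m:Int))]
  interval_cases n <;> interval_cases m <;> rfl

theorem A_eval (rmap : List (String × String)) :
    grid_from_range_map rmap =
      (PySem.List.enumerate pvRANKS 0).foldl
        (fun grid p => (PySem.List.enumerate pvRANKS 0).foldl (aInner rmap p.1 p.2) grid) g0 := rfl

theorem cellA (rmap : List (String × String)) {i j : Int}
    (hi0 : 0 ≤ i) (hi1 : i < 13) (hj0 : 0 ≤ j) (hj1 : j < 13) :
    cellC (grid_from_range_map rmap) i j = aCell rmap (keyAtZ i j) := by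
  obtain ⟨hP, hmem, _⟩ := A_outer rmap (PySem.List.enumerate pvRANKS 0) g0
    enum_nodup enum_bounds P13_g0
  have hrow := hmem (i, pvRANKS.getD i.toNat "") (mem_enum hi0 hi1)
  have hrbd : ∀ q ∈ PySem.List.enumerate pvRANKS 0,
      0 ≤ q.1 ∧ q.1 < ((PySem.List.pyGetD g0 i []).length : Int) := by
    intro q hq
    rw [row_len P13_g0 hi0 hi1]
    exact_mod_cast enum_bounds q hq
  obtain ⟨_, hcellr, _⟩ := A_row rmap i (pvRANKS.getD i.toNat "") (PySem.List.enumerate pvRANKS 0)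
    (PySem.List.pyGetD g0 i []) enum_nodup hrbd
  have hcell := hcellr (j, pvRANKS.getD j.toNat "") (mem_enum hj0 hj1)
  dsimp only at hcell
  unfold cellC
  rw [A_eval, hrow, hcell,
    show PySem.List.pyGetD (PySem.List.pyGetD g0 i []) j "" = "" from g0_cell hi0 hi1 hj0 hj1]
  rfl

theorem P13_A (rmap : List (String × String)) : P13 (grid_from_range_map rmap) := by
  rw [A_eval]
  exact (A_outer rmap (PySem.List.enumerate pvRANKS 0) g0 enum_nodup enum_bounds P13_g0).1

theorem cell_getElem {g : List (List String)} {n m : Nat} (hn : n < g.length)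
    (hm : m < (g[n]).length) : g[n][m] = cellC g (n : Int) (m : Int) := by
  unfold cellC
  rw [PySem.List.pyGetD_natCast, PySem.List.pyGetD_natCast,
    show (g.getD n []) = g[n] from by
      rw [List.getD_eq_getElem?_getD, List.getElem?_eq_getElem hn, Option.getD_some],
    List.getD_eq_getElem?_getD, List.getElem?_eq_getElem hm, Option.getD_some]

theorem B_eval (rmap : List (String × String)) :
    grid_from_range_map_alt rmap = rmap.foldl bStep g0 := rfl

theorem AB_eq (rmap : List (String × String)) (hpre : (rmap.map Prod.fst).Nodup) :
    grid_from_range_map rmap = grid_from_range_map_alt rmap := by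
  obtain ⟨hBP, hBcell⟩ := B_fold rmap g0 hpre P13_g0
  have hA := P13_A rmap
  rw [B_eval]
  apply List.ext_getElem
  · rw [hA.1, hBP.1]
  · intro n h1 h2
    apply List.ext_getElem
    · rw [hA.2 _ (List.getElem_mem h1), hBP.2 _ (List.getElem_mem h2)]
    · intro m hm1 hm2
      have hn13 : n < 13 := by
        have := hA.1
        omega
      have hm13 : m < 13 := by
        have := hA.2 _ (List.getElem_mem h1)
        omega
      have hi0 : (0:Int) ≤ (n:Int) := by omega
      have hi1 : ((n:Int)) < 13 := by exact_mod_cast hn13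
      have hj0 : (0:Int) ≤ (m:Int) := by omega
      have hj1 : ((m:Int)) < 13 := by exact_mod_cast hm13
      rw [cell_getElem h1 hm1, cell_getElem h2 hm2,
        cellA rmap hi0 hi1 hj0 hj1, hBcell _ _ hi0 hi1 hj0 hj1]
      unfold aCell
      rw [PySem.Dict.contains_eq_isSome_get?]
      cases hres : (PySem.Dict.mk rmap).get? (keyAtZ (n:Int) (m:Int))
      · exact (g0_cell hi0 hi1 hj0 hj1).symm
      · rfl

-- ===== VERDICT (by name: the statement is the Claim_ definition above) =====
theorem grid_from_range_map_spec : Claim_equal_grid_from_range_map := by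
  intro rmap _ hpre
  exact AB_eq rmap hpre
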